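-- pv_equiv track=rewrite | github.com/Oluwatobiloba-ojo/python | chibuzor_snacks/student_grade_function.py | check_for_the_subject_with_highest_score
-- ===== SOURCE A (Python) =====
-- def check_for_the_subject_with_highest_score(grades, sub):
--     subject = 1
--     maximum = grades[0][0]
--     student = 1
--     for value in range(sub):
--         for idx, stud in enumerate(grades):
--             if grades[idx][value] > maximum:
--                 maximum = grades[idx][value]
--                 student = idx + 1
--                 subject = value + 1
--     return [subject, student, maximum]
-- ===== SOURCE B (Python) =====
-- def check_for_the_subject_with_highest_score(grades, sub):
--     n = len(grades)
--     corner = grades[0][0]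
--     flat = [grades[i][c] for c in range(sub) for i in range(n)]
--     m = max(flat, default=corner)
--     if m <= corner:
--         return [1, 1, corner]
--     k = flat.index(m)
--     return [k // n + 1, k % n + 1, m]
-- ===== Notes on version B (the rewrite author's own statement) =====
-- stated objective: alternative
-- what changed: A keeps a running (subject, student, maximum) record while scanning the grid column by column; B instead flattens the scanned columns into one column-major list, takes its maximum (default = grades[0][0]), locates the maximum's first index with list.index, and recovers subject/student by divmod.
import Mathlib
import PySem

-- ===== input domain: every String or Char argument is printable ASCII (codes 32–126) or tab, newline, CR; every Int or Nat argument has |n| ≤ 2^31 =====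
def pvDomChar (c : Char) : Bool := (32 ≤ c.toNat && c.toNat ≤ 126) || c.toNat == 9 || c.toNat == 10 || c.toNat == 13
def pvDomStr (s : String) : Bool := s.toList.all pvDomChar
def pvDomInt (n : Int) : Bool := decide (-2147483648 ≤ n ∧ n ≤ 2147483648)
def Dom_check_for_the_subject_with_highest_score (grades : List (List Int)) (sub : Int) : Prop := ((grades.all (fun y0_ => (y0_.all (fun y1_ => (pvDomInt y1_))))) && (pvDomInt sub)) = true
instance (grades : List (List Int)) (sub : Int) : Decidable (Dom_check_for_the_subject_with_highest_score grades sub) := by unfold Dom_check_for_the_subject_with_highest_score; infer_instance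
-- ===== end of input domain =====

-- B replaces A's online record-keeping scan by a two-phase computation (flatten column-major,
-- take the max, locate its first index, recover coordinates by divmod); same exact values.

-- ===== PORT A =====
-- state is (subject, maximum, student), exactly A's three variables
def check_for_the_subject_with_highest_score (grades : List (List Int)) (sub : Int) : List Int :=
  let st0 : Int × Int × Int := (1, PySem.List.pyGetD (PySem.List.pyGetD grades 0 []) 0 0, 1)
  let st := (PySem.List.pyRange 0 sub).foldl
    (fun st value =>
      (PySem.List.enumerate grades).foldl
        (fun (st : Int × Int × Int) (p : Int × List Int) =>
          if PySem.List.pyGetD (PySem.List.pyGetD grades p.1 []) value 0 > st.2.1 then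
            (value + 1, PySem.List.pyGetD (PySem.List.pyGetD grades p.1 []) value 0, p.1 + 1)
          else st)
        st)
    st0
  [st.1, st.2.2, st.2.1]

-- ===== PORT B =====
def check_for_the_subject_with_highest_score_alt (grades : List (List Int)) (sub : Int) : List Int :=
  let n := PySem.List.len grades
  let corner := PySem.List.pyGetD (PySem.List.pyGetD grades 0 []) 0 0
  let flat := (PySem.List.pyRange 0 sub).flatMap (fun c =>
    (PySem.List.pyRange 0 n).map (fun i => PySem.List.pyGetD (PySem.List.pyGetD grades i []) c 0))
  let m := PySem.List.maxD flat (fun x => x) corner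
  if m ≤ corner then [1, 1, corner]
  else
    match PySem.List.index? flat m with
    | some k => [PySem.Int.floordiv k n + 1, PySem.Int.mod k n + 1, m]
    | none => [1, 1, corner]  -- dead branch: m > corner forces m ∈ flat, so .index returns

-- ===== PRECONDITION & SPEC =====
-- Pre_ excludes exactly the inputs where Python A raises IndexError: an empty grid, an empty
-- first row, or some row shorter than sub (each scanned column must exist in every row).
def Pre_check_for_the_subject_with_highest_score (grades : List (List Int)) (sub : Int) : Prop :=
  0 < grades.length ∧ 0 < (grades.getD 0 []).length ∧ ∀ row ∈ grades, sub ≤ (row.length : Int)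
instance (grades : List (List Int)) (sub : Int) : Decidable (Pre_check_for_the_subject_with_highest_score grades sub) := by unfold Pre_check_for_the_subject_with_highest_score; infer_instance

def pvWitness_check_for_the_subject_with_highest_score : List (List Int) × Int := ([[1, 2], [3, 4]], 2)

def Spec_check_for_the_subject_with_highest_score (grades : List (List Int)) (sub : Int) (out : List Int) : Prop := out = check_for_the_subject_with_highest_score_alt grades sub
instance (grades : List (List Int)) (sub : Int) (out : List Int) : Decidable (Spec_check_for_the_subject_with_highest_score grades sub out) := by unfold Spec_check_for_the_subject_with_highest_score; infer_instance

-- ===== CLAIM (what is proved, stated in full; the proofs are below) =====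
def Claim_equal_check_for_the_subject_with_highest_score : Prop := ∀ (grades : List (List Int)) (sub : Int), Dom_check_for_the_subject_with_highest_score grades sub → Pre_check_for_the_subject_with_highest_score grades sub → Spec_check_for_the_subject_with_highest_score grades sub (check_for_the_subject_with_highest_score grades sub)

-- ===== LEMMAS AND PROOFS =====

-- grades[i][c] (total form used by both ports)
def pvG (grades : List (List Int)) (i c : Int) : Int :=
  PySem.List.pyGetD (PySem.List.pyGetD grades i []) c 0

-- A's loop body on an abstract item (value, subject-if-chosen, student-if-chosen)
def pvStep (st : Int × Int × Int) (p : Int × Int × Int) : Int × Int × Int :=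
  if p.1 > st.2.1 then (p.2.1, p.1, p.2.2) else st

-- the column-major item list A effectively scans
def pvLA (grades : List (List Int)) (N : Nat) : List (Int × Int × Int) :=
  (List.range N).flatMap (fun c : Nat => (List.range grades.length).map (fun i : Nat =>
    (pvG grades (i : Int) (c : Int), ((c : Int) + 1, (i : Int) + 1))))

lemma pvStep_snd_fst (st p : Int × Int × Int) : (pvStep st p).2.1 = max st.2.1 p.1 := by
  unfold pvStep; split <;> simp <;> omega

lemma pvStep_max (L : List (Int × Int × Int)) (st : Int × Int × Int) :
    (L.foldl pvStep st).2.1 = (L.map Prod.fst).foldl max st.2.1 := by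
  induction L generalizing st with
  | nil => rfl
  | cons p t ih => simp only [List.foldl_cons, List.map_cons, ih, pvStep_snd_fst]

lemma pvStep_unchanged (L : List (Int × Int × Int)) (st : Int × Int × Int)
    (h : ∀ p ∈ L, p.1 ≤ st.2.1) : L.foldl pvStep st = st := by
  induction L with
  | nil => rfl
  | cons p t ih =>
    have hp : pvStep st p = st := by
      unfold pvStep; rw [if_neg]; exact not_lt.mpr (h p (List.mem_cons_self))
    simp only [List.foldl_cons, hp]
    exact ih (fun q hq => h q (List.mem_cons_of_mem _ hq))

lemma pvFoldl_max_max (t : List Int) (a x : Int) :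
    List.foldl max (max a x) t = max a (List.foldl max x t) := by
  induction t generalizing x with
  | nil => rfl
  | cons y t ih => simp only [List.foldl_cons, max_assoc, ih]

lemma pvStep_pos (L : List (Int × Int × Int)) (st : Int × Int × Int) (M : Int) (k : Nat)
    (hMeq : (L.map Prod.fst).foldl max st.2.1 = M) (hM : st.2.1 < M)
    (hidx : PySem.List.index? (L.map Prod.fst) M = some k) :
    ∃ hk : k < L.length, L.foldl pvStep st = ((L[k]).2.1, M, (L[k]).2.2) := by
  induction L using List.reverseRecOn generalizing M k with
  | nil =>
    simp only [List.map_nil, List.foldl_nil] at hMeq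
    omega
  | append_singleton L p ih =>
    have hmap : (L ++ [p]).map Prod.fst = L.map Prod.fst ++ [p.1] := by simp
    have hM' : ((L ++ [p]).map Prod.fst).foldl max st.2.1
        = max ((L.map Prod.fst).foldl max st.2.1) p.1 := by
      rw [hmap, List.foldl_append]; rfl
    by_cases hp : (L.map Prod.fst).foldl max st.2.1 < p.1
    · -- the new item is a strict record: it is the (first) max of the whole list
      have hMval : M = p.1 := by rw [← hMeq, hM', max_eq_right (le_of_lt hp)]
      have hnot : p.1 ∉ L.map Prod.fst := by
        intro hmem
        exact absurd ((PySem.List.le_foldl_max (L.map Prod.fst) st.2.1).2 p.1 hmem)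
          (not_le.mpr hp)
      have hidx' : PySem.List.index? ((L ++ [p]).map Prod.fst) M = some (L.map Prod.fst).length := by
        rw [hmap, hMval]; exact PySem.List.index?_append_singleton_self _ _ hnot
      rw [hidx'] at hidx
      have hkeq : k = L.length := by simpa using (Option.some_inj.mp hidx).symm
      subst hkeq
      refine ⟨by simp only [List.length_append, List.length_cons, List.length_nil]; omega, ?_⟩
      have hcond : p.1 > (L.foldl pvStep st).2.1 := by rw [pvStep_max]; exact hp
      have hstep : pvStep (L.foldl pvStep st) p = (p.2.1, p.1, p.2.2) := if_pos hcond
      rw [List.foldl_append, List.foldl_cons, List.foldl_nil, hstep,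
        List.getElem_concat_length, hMval]
      rfl
    · -- the max lives in the prefix; the new item does not change the state
      push_neg at hp
      have hMval : M = (L.map Prod.fst).foldl max st.2.1 := by
        rw [← hMeq, hM', max_eq_left hp]
      have hmem : (L.map Prod.fst).foldl max st.2.1 ∈ L.map Prod.fst := by
        rcases PySem.List.foldl_max_mem (L.map Prod.fst) st.2.1 with h | h
        · rw [hMval] at hM; omega
        · exact h
      have hidx' : PySem.List.index? (L.map Prod.fst) M = some k := by
        rw [hmap] at hidx
        rwa [hMval, PySem.List.index?_append_of_mem [p.1] hmem, ← hMval] at hidx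
      obtain ⟨hk, hfold⟩ := ih M k hMval.symm hM hidx'
      refine ⟨by simp; omega, ?_⟩
      have hcond : ¬ p.1 > (L.foldl pvStep st).2.1 := by
        rw [pvStep_max, ← hMval]; omega
      have hstep : pvStep (L.foldl pvStep st) p = L.foldl pvStep st := if_neg hcond
      rw [List.foldl_append, List.foldl_cons, List.foldl_nil, hstep, hfold]
      rw [List.getElem_append_left hk]

lemma pvLA_eq (grades : List (List Int)) (N : Nat) :
    pvLA grades N = (List.range (N * grades.length)).map (fun k =>
      (pvG grades (((k % grades.length : Nat) : Int)) (((k / grades.length : Nat) : Int)),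
        ((k / grades.length : Nat) : Int) + 1, ((k % grades.length : Nat) : Int) + 1)) := by
  induction N with
  | zero => simp [pvLA]
  | succ N ih =>
    unfold pvLA at ih ⊢
    rw [List.range_succ, List.flatMap_append, ih, Nat.succ_mul, List.range_add,
      List.map_append, List.flatMap_cons, List.flatMap_nil, List.append_nil, List.map_map]
    congr 1
    apply List.map_congr_left
    intro i hi
    have hi' := List.mem_range.mp hi
    have hn : 0 < grades.length := by omega
    have hdiv : (N * grades.length + i) / grades.length = N := by
      rw [Nat.mul_comm, Nat.mul_add_div hn, Nat.div_eq_of_lt hi', Nat.add_zero]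
    have hmod : (N * grades.length + i) % grades.length = i := by
      rw [Nat.mul_comm, Nat.mul_add_mod, Nat.mod_eq_of_lt hi']
    simp only [Function.comp_apply, hdiv, hmod]

lemma pvA_fold (grades : List (List Int)) (sub : Int) (st0 : Int × Int × Int) :
    (PySem.List.pyRange 0 sub).foldl
      (fun st value =>
        (PySem.List.enumerate grades).foldl
          (fun (st : Int × Int × Int) (p : Int × List Int) =>
            if PySem.List.pyGetD (PySem.List.pyGetD grades p.1 []) value 0 > st.2.1 then
              (value + 1, PySem.List.pyGetD (PySem.List.pyGetD grades p.1 []) value 0, p.1 + 1)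
            else st)
          st)
      st0
    = (pvLA grades sub.toNat).foldl pvStep st0 := by
  unfold pvLA
  rw [List.foldl_flatMap]
  rw [PySem.List.enumerate_eq_map_pyRange grades []]
  simp only [PySem.List.pyRange_one, PySem.List.len_eq, Int.sub_zero, Int.toNat_natCast,
    List.foldl_map, zero_add]
  apply PySem.List.foldl_congr_mem
  intro st c _
  apply PySem.List.foldl_congr_mem
  intro st' i _
  simp [pvStep, pvG]

lemma pvB_flat (grades : List (List Int)) (sub : Int) :
    (PySem.List.pyRange 0 sub).flatMap (fun c =>
      (PySem.List.pyRange 0 (PySem.List.len grades)).map (fun i =>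
        PySem.List.pyGetD (PySem.List.pyGetD grades i []) c 0))
    = (pvLA grades sub.toNat).map Prod.fst := by
  unfold pvLA
  rw [List.map_flatMap]
  simp only [PySem.List.pyRange_one, PySem.List.len_eq, Int.sub_zero, Int.toNat_natCast,
    List.flatMap_map, List.map_map, zero_add]
  simp [Function.comp_def, pvG]

lemma pvMain (grades : List (List Int)) (sub : Int) :
    check_for_the_subject_with_highest_score grades sub
      = check_for_the_subject_with_highest_score_alt grades sub := by
  unfold check_for_the_subject_with_highest_score check_for_the_subject_with_highest_score_alt
  simp only []
  rw [pvA_fold, pvB_flat]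
  set corner := PySem.List.pyGetD (PySem.List.pyGetD grades 0 []) 0 0 with hcorner
  set L := pvLA grades sub.toNat with hL
  cases hflat : L.map Prod.fst with
  | nil =>
    have hLnil : L = [] := List.map_eq_nil_iff.mp hflat
    rw [hLnil]
    simp [PySem.List.maxD, PySem.List.max?]
  | cons x t =>
    have hmaxD : PySem.List.maxD (x :: t) (fun x => x) corner = t.foldl max x := by
      simp [PySem.List.maxD, PySem.List.max?_id_cons]
    set m := t.foldl max x with hm
    have hMfold : (L.map Prod.fst).foldl max corner = max corner m := by
      rw [hflat, List.foldl_cons, pvFoldl_max_max]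
    by_cases hle : m ≤ corner
    · -- nothing beats the corner: A never updates, B takes the default branch
      have hunch : L.foldl pvStep (1, corner, 1) = (1, corner, 1) := by
        apply pvStep_unchanged
        intro p hp
        have hmem : p.1 ∈ L.map Prod.fst := List.mem_map_of_mem hp
        have := (PySem.List.le_foldl_max (L.map Prod.fst) corner).2 p.1 hmem
        rw [hMfold] at this
        simp only []
        omega
      rw [hunch, hmaxD, if_pos hle]
    · -- the max beats the corner: both return its first column-major position
      push_neg at hle
      have hMeq : (L.map Prod.fst).foldl max corner = m := by
        rw [hMfold]; omega
      have hmem : m ∈ L.map Prod.fst := by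
        rw [hflat]
        rcases PySem.List.foldl_max_mem t x with h | h
        · rw [hm, h]; exact List.mem_cons_self
        · exact List.mem_cons_of_mem _ h
      obtain ⟨k, hidx⟩ := Option.isSome_iff_exists.mp
        ((PySem.List.index?_isSome_iff (L.map Prod.fst) m).mpr hmem)
      obtain ⟨hk, hfold⟩ := pvStep_pos L (1, corner, 1) m k hMeq hle hidx
      have hsc : PySem.List.index? (x :: t) m = some k := by rw [← hflat]; exact hidx
      have hLeq : L = (List.range (sub.toNat * grades.length)).map (fun k =>
          (pvG grades (((k % grades.length : Nat) : Int)) (((k / grades.length : Nat) : Int)),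
            ((k / grades.length : Nat) : Int) + 1, ((k % grades.length : Nat) : Int) + 1)) := by
        rw [hL, pvLA_eq]
      have hklt : k < sub.toNat * grades.length := by
        have h2 := hk
        rw [hLeq] at h2
        simpa using h2
      have hLk := List.getElem_of_eq hLeq hk
      simp only [List.getElem_map, List.getElem_range] at hLk
      rw [hfold, hmaxD, if_neg (by omega), hsc, hLk]
      simp [PySem.Int.floordiv_natCast, PySem.Int.mod_natCast]

-- ===== VERDICT (by name: the statement is the Claim_ definition above) =====
theorem check_for_the_subject_with_highest_score_spec : Claim_equal_check_for_the_subject_with_highest_score := by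
  intro grades sub _ _
  unfold Spec_check_for_the_subject_with_highest_score
  exact pvMain grades sub
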